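-- pv_equiv track=rewrite | github.com/akhandsingh17/assignments | codingexercise/SmallestThreedigitNumberFromBigNumber.py | SmallestThreeDigitNumberFromBigNumber
-- ===== SOURCE A (Python) =====
-- import collections
--
-- def SmallestThreeDigitNumberFromBigNumber(num):
--
--     ary=list(str(num))
--     lst=[]
--     cnt=[]
--     dict=collections.Counter(ary)
--     for key,val in dict.items():
--         lst.append(key)
--         cnt.append(val)
--     tmp=[]
--     fnl_lst=[]
--     Combinations_recur(lst,cnt,tmp,fnl_lst)
--     return sorted(fnl_lst)[0]
--
-- def Combinations_recur(lst,cnt,tmp,fnl_lst):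
--
--     if len(tmp)==3:
--         fnl_lst.append(''.join(tmp))
--         return
--
--     for i in range(0,len(lst)):
--         if cnt[i]==0:
--             continue
--         tmp.append(lst[i])
--         cnt[i]=cnt[i]-1
--         Combinations_recur(lst, cnt, tmp, fnl_lst)
--         cnt[i]=cnt[i]+1
--         tmp.pop()
-- ===== SOURCE B (Python) =====
-- def SmallestThreeDigitNumberFromBigNumber(num):
--     s = sorted(str(num))
--     return s[0] + s[1] + s[2]
-- ===== Notes on version B (the rewrite author's own statement) =====
-- stated objective: simpler
-- what changed: Replaces the recursive enumeration of all length-3 permutations of the digit multiset (then sorting the whole permutation list and taking its head) with a single character sort of str(num) and direct selection of the three smallest characters; positional indexing keeps the IndexError on inputs with fewer than 3 characters, which Pre_ excludes.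
-- outside the precondition, e.g. on SmallestThreeDigitNumberFromBigNumber(3): A raises IndexError, B raises IndexError
import Mathlib
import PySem

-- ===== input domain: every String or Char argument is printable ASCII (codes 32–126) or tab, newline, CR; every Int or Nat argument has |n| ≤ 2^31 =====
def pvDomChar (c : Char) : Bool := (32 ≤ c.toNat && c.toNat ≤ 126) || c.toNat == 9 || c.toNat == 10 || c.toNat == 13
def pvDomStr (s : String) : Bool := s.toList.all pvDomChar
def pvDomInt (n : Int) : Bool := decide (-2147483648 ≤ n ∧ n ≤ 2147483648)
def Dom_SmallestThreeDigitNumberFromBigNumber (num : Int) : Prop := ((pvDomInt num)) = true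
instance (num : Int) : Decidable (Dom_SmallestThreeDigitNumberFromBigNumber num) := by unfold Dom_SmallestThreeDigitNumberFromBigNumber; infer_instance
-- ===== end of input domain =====

-- B replaces A's recursive enumeration of every length-3 permutation of the digit
-- multiset (followed by sorting that list of strings) with one character sort of
-- str(num) and direct selection of its three smallest characters.

-- ===== PORT A =====
-- Combinations_recur: the mutated arguments tmp/cnt are restored by A before each
-- return, so each call is modelled as a function from (lst, cnt, tmp, fnl) to the
-- new fnl; the `for i in range(...)` loop is `combLoop` recursing over the index
-- list. `fuel` only makes the recursion total: tmp grows by 1 per level and the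
-- recursion stops at len(tmp)==3, so fuel 4 is never exhausted.
mutual
def combRec : Nat → List Char → List Int → List Char → List String → List String
  | 0, _, _, _, fnl => fnl
  | fuel+1, lst, cnt, tmp, fnl =>
    if tmp.length = 3 then fnl ++ [String.ofList tmp]
    else combLoop fuel lst cnt tmp fnl (List.range lst.length)
  termination_by fuel _ _ _ _ => (fuel, 0)
def combLoop : Nat → List Char → List Int → List Char → List String → List Nat → List String
  | _, _, _, _, fnl, [] => fnl
  | fuel, lst, cnt, tmp, fnl, i :: rest =>
    combLoop fuel lst cnt tmp
      (if cnt.getD i 0 = 0 then fnl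
       else combRec fuel lst (cnt.set i (cnt.getD i 0 - 1)) (tmp ++ [lst.getD i ' ']) fnl)
      rest
  termination_by fuel _ _ _ _ is => (fuel, is.length + 1)
end

def SmallestThreeDigitNumberFromBigNumber (num : Int) : String :=
  let ary := PySem.Int.toChars num                   -- ary = list(str(num))
  let d := PySem.Dict.counter ary                    -- dict = collections.Counter(ary)
  let lst := d.items.map Prod.fst                    -- lst.append(key)
  let cnt := d.items.map Prod.snd                    -- cnt.append(val)
  let fnl := combRec 4 lst cnt [] []                 -- Combinations_recur(lst,cnt,[],fnl)
  (PySem.List.pyGet? (PySem.List.sorted fnl (fun x => x) false) 0).getD ""   -- sorted(fnl)[0]; IndexError outside Pre_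

-- ===== PORT B =====
def SmallestThreeDigitNumberFromBigNumber_alt (num : Int) : String :=
  let s := PySem.List.sorted (PySem.Int.toChars num) (fun c => c) false   -- s = sorted(str(num))
  match PySem.List.pyGet? s 0, PySem.List.pyGet? s 1, PySem.List.pyGet? s 2 with                           -- s[0] + s[1] + s[2]
  | some a, some b, some c => String.ofList [a, b, c]
  | _, _, _ => ""                                                          -- IndexError outside Pre_

-- ===== PRECONDITION & SPEC =====
-- Pre_ excludes exactly the inputs where str(num) has fewer than 3 characters
-- (−9 ≤ num ≤ 99): there A raises IndexError (sorted(fnl)[0] of an empty list),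
-- and B raises IndexError as well (s[2]).
def Pre_SmallestThreeDigitNumberFromBigNumber (num : Int) : Prop :=
  3 ≤ (PySem.Int.toChars num).length
instance (num : Int) : Decidable (Pre_SmallestThreeDigitNumberFromBigNumber num) := by unfold Pre_SmallestThreeDigitNumberFromBigNumber; infer_instance
def pvWitness_SmallestThreeDigitNumberFromBigNumber : Int := 102

def Spec_SmallestThreeDigitNumberFromBigNumber (num : Int) (out : String) : Prop := out = SmallestThreeDigitNumberFromBigNumber_alt num
instance (num : Int) (out : String) : Decidable (Spec_SmallestThreeDigitNumberFromBigNumber num out) := by unfold Spec_SmallestThreeDigitNumberFromBigNumber; infer_instance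

-- ===== CLAIM (what is proved, stated in full; the proofs are below) =====
def Claim_equal_SmallestThreeDigitNumberFromBigNumber : Prop := ∀ (num : Int), Dom_SmallestThreeDigitNumberFromBigNumber num → Pre_SmallestThreeDigitNumberFromBigNumber num → Spec_SmallestThreeDigitNumberFromBigNumber num (SmallestThreeDigitNumberFromBigNumber num)

-- ===== LEMMAS AND PROOFS =====

theorem combLoop_append_of (fuel : Nat) (lst : List Char)
    (h : ∀ (cnt : List Int) (tmp : List Char) (fnl : List String),
      combRec fuel lst cnt tmp fnl = fnl ++ combRec fuel lst cnt tmp [])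
    (cnt : List Int) (tmp : List Char) (is : List Nat) (fnl : List String) :
    combLoop fuel lst cnt tmp fnl is = fnl ++ combLoop fuel lst cnt tmp [] is := by
  induction is generalizing fnl with
  | nil => simp [combLoop]
  | cons i rest ih =>
    simp only [combLoop]
    rw [ih, ih (if cnt.getD i 0 = 0 then [] else _)]
    split
    · simp
    · rw [h]; simp

theorem combRec_append (fuel : Nat) (lst : List Char) (cnt : List Int) (tmp : List Char)
    (fnl : List String) : combRec fuel lst cnt tmp fnl = fnl ++ combRec fuel lst cnt tmp [] := by
  induction fuel generalizing cnt tmp fnl with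
  | zero => simp [combRec]
  | succ f ih =>
    simp only [combRec]
    split
    · simp
    · rw [combLoop_append_of f lst (fun c t fl => ih c t fl)]

theorem combLoop_eq_flatMap (fuel : Nat) (lst : List Char) (cnt : List Int) (tmp : List Char)
    (is : List Nat) :
    combLoop fuel lst cnt tmp [] is = is.flatMap (fun i =>
      if cnt.getD i 0 = 0 then []
      else combRec fuel lst (cnt.set i (cnt.getD i 0 - 1)) (tmp ++ [lst.getD i ' ']) []) := by
  induction is with
  | nil => simp [combLoop]
  | cons i rest ih =>
    simp only [combLoop, List.flatMap_cons]
    rw [combLoop_append_of fuel lst (fun c t fl => combRec_append fuel lst c t fl), ih]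

theorem getD_map_count (lst : List Char) (g : Char → Nat) (i : Nat) (hi : i < lst.length) :
    (lst.map (fun k => ((g k : Nat) : Int))).getD i 0 = (g lst[i] : Int) := by
  simp [List.getD_eq_getElem?_getD, hi]

theorem set_map_update (lst : List Char) (g : Char → Nat) (i : Nat) (hi : i < lst.length)
    (hn : lst.Nodup) (h1 : g lst[i] ≠ 0) :
    (lst.map (fun k => ((g k : Nat) : Int))).set i ((g lst[i] : Int) - 1) =
      lst.map (fun k => (((Function.update g lst[i] (g lst[i] - 1)) k : Nat) : Int)) := by
  apply List.ext_getElem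
  · simp
  · intro j hj hj'
    simp only [List.getElem_set, List.getElem_map]
    by_cases hij : i = j
    · subst hij
      simp only [Function.update_self, if_true]
      omega
    · rw [if_neg hij, Function.update_of_ne]
      intro hcc
      exact hij (hn.getElem_inj_iff.mp hcc.symm)

theorem combRec_sound (fuel : Nat) (lst : List Char) (g : Char → Nat) (tmp : List Char)
    (hn : lst.Nodup) (x : String)
    (hx : x ∈ combRec fuel lst (lst.map (fun k => ((g k : Nat) : Int))) tmp []) :
    ∃ u : List Char, x = String.ofList (tmp ++ u) ∧ tmp.length + u.length = 3 ∧
      (∀ c, u.count c ≤ g c) ∧ (∀ c ∈ u, c ∈ lst) := by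
  induction fuel generalizing g tmp with
  | zero => simp [combRec] at hx
  | succ f ih =>
    simp only [combRec] at hx
    split at hx
    · rename_i h3
      simp only [List.nil_append, List.mem_singleton] at hx
      exact ⟨[], by simpa using hx, by simpa using h3, by simp, by simp⟩
    · rw [combLoop_eq_flatMap] at hx
      rw [List.mem_flatMap] at hx
      obtain ⟨i, hi, hxi⟩ := hx
      rw [List.mem_range] at hi
      split at hxi
      · simp at hxi
      · rename_i hg
        rw [getD_map_count lst g i hi] at hxi hg
        have hg0 : g lst[i] ≠ 0 := by
          intro h; rw [h] at hg; exact hg rfl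
        rw [set_map_update lst g i hi hn hg0] at hxi
        have hgd : lst.getD i ' ' = lst[i] := by
          simp [List.getD_eq_getElem?_getD, hi]
        rw [hgd] at hxi
        obtain ⟨u', hxu, hlen, hcnt, hmem⟩ := ih (Function.update g lst[i] (g lst[i] - 1)) (tmp ++ [lst[i]]) hxi
        refine ⟨lst[i] :: u', by simpa using hxu, by simp at hlen ⊢; omega, ?_, ?_⟩
        · intro d
          rcases eq_or_ne d lst[i] with hd | hd
          · rw [hd, List.count_cons_self]
            have h2 := hcnt lst[i]
            rw [Function.update_self] at h2
            omega
          · rw [List.count_cons_of_ne (Ne.symm hd)]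
            have h2 := hcnt d
            rw [Function.update_of_ne hd] at h2
            exact h2
        · intro c hc
          rcases List.mem_cons.mp hc with hc | hc
          · subst hc; exact List.getElem_mem hi
          · exact hmem c hc

theorem combRec_complete (fuel : Nat) (lst : List Char) (g : Char → Nat) (tmp u : List Char)
    (hn : lst.Nodup) (hlen : tmp.length + u.length = 3) (hfuel : u.length < fuel)
    (hfit : ∀ c, u.count c ≤ g c) (hmem : ∀ c ∈ u, c ∈ lst) :
    String.ofList (tmp ++ u) ∈ combRec fuel lst (lst.map (fun k => ((g k : Nat) : Int))) tmp [] := by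
  induction fuel generalizing g tmp u with
  | zero => omega
  | succ f ih =>
    simp only [combRec]
    cases u with
    | nil =>
      rw [if_pos (by simpa using hlen)]
      simp
    | cons c u' =>
      rw [if_neg (by simp at hlen ⊢; omega)]
      rw [combLoop_eq_flatMap, List.mem_flatMap]
      have hcl : c ∈ lst := hmem c (List.mem_cons_self ..)
      obtain ⟨i, hi, hci⟩ := List.mem_iff_getElem.mp hcl
      refine ⟨i, List.mem_range.mpr hi, ?_⟩
      have hgc : 1 ≤ g lst[i] := by
        rw [hci]; exact le_trans (by simp) (hfit c)
      rw [getD_map_count lst g i hi]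
      rw [if_neg (by intro h; rw [Int.natCast_eq_zero] at h; omega)]
      have hgd : lst.getD i ' ' = lst[i] := by
        simp [List.getD_eq_getElem?_getD, hi]
      rw [hgd, set_map_update lst g i hi hn (by omega)]
      have hrec := ih (Function.update g lst[i] (g lst[i] - 1)) (tmp ++ [lst[i]]) u' ?_ ?_ ?_ ?_
      · rw [← hci]
        simpa using hrec
      · simp at hlen ⊢; omega
      · simp at hfuel ⊢; omega
      · intro d
        rcases eq_or_ne d lst[i] with hd | hd
        · subst hd
          rw [Function.update_self]
          have h2 := hfit lst[i]
          rw [← hci, List.count_cons_self] at h2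
          omega
        · rw [Function.update_of_ne hd]
          have h2 := hfit d
          rw [List.count_cons_of_ne (by rw [hci] at hd; exact Ne.symm hd)] at h2
          exact h2
      · intro d hd
        exact hmem d (List.mem_cons_of_mem _ hd)

-- the lexicographic minimum: a sorted list's prefix is ≤ any sub-permutation of equal length
theorem take_sorted_le (u s : List Char) (hs : s.Pairwise (· ≤ ·)) (hsub : u.Subperm s) :
    s.take u.length ≤ u := by
  induction u generalizing s with
  | nil =>
    simp only [List.length_nil, List.take_zero]
    exact le_refl _
  | cons a u' ih =>
    have ha : a ∈ s := hsub.subset (List.mem_cons_self ..)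
    cases s with
    | nil => simp at ha
    | cons s0 s' =>
      have hs0 : s0 ≤ a := by
        rcases List.mem_cons.mp ha with h | h
        · exact le_of_eq h.symm
        · exact (List.pairwise_cons.mp hs).1 a h
      simp only [List.length_cons, List.take_succ_cons]
      rcases lt_or_eq_of_le hs0 with hlt | heq
      · exact le_of_lt (List.Lex.rel hlt)
      · subst heq
        have h2 := ih s' (List.pairwise_cons.mp hs).2 ((List.subperm_cons s0).mp hsub)
        rcases lt_or_eq_of_le h2 with hlt | heq2
        · exact le_of_lt (List.Lex.cons hlt)
        · rw [heq2]

-- ===== VERDICT (by name: the statement is the Claim_ definition above) =====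
theorem SmallestThreeDigitNumberFromBigNumber_spec : Claim_equal_SmallestThreeDigitNumberFromBigNumber := by
  intro num _ hpre
  have hlen : 3 ≤ (PySem.Int.toChars num).length := hpre
  -- name the digit list and its sort
  set ary := PySem.Int.toChars num with hary
  set s := PySem.List.sorted ary (fun c => c) false with hsdef
  have hslen : 3 ≤ s.length := by
    rw [hsdef, PySem.List.length_sorted]; exact hlen
  obtain ⟨c0, c1, c2, rest, hs⟩ : ∃ c0 c1 c2 rest, s = c0 :: c1 :: c2 :: rest := by
    rcases s with _ | ⟨c0, _ | ⟨c1, _ | ⟨c2, rest⟩⟩⟩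
    · simp at hslen
    · simp at hslen
    · simp at hslen
    · exact ⟨c0, c1, c2, rest, rfl⟩
  have hperm : s.Perm ary := PySem.List.sorted_perm ary (fun c => c) false
  have hpair : s.Pairwise (· ≤ ·) := PySem.List.sorted_pairwise ary (fun c => c)
  -- the dict of A is Counter(ary); its keys/values
  have hlst : ((PySem.Dict.counter ary).items.map Prod.fst) = PySem.Set.ofList ary := by
    rw [PySem.Dict.items_counter, List.map_map]
    simp [Function.comp_def]
  have hcnt : ((PySem.Dict.counter ary).items.map Prod.snd) =
      (PySem.Set.ofList ary).map (fun k => ((List.count k ary : Nat) : Int)) := by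
    rw [PySem.Dict.items_counter]; simp
  have hnodup : (PySem.Set.ofList ary : List Char).Nodup := PySem.Set.nodup_ofList ary
  set g : Char → Nat := fun k => List.count k ary with hg
  set fnl := combRec 4 (PySem.Set.ofList ary)
      ((PySem.Set.ofList ary).map (fun k => ((g k : Nat) : Int))) [] [] with hfnl
  set m := String.ofList [c0, c1, c2] with hm
  -- m is one of the enumerated 3-permutations
  have hmmem : m ∈ fnl := by
    rw [hfnl]
    have := combRec_complete 4 (PySem.Set.ofList ary) g [] [c0, c1, c2] hnodup
      (by simp) (by simp) ?_ ?_
    · simpa using this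
    · intro c
      have hsub : [c0, c1, c2].Sublist s := by rw [hs]; simp
      calc List.count c [c0, c1, c2] ≤ List.count c s := hsub.count_le c
        _ = List.count c ary := hperm.count_eq c
    · intro c hc
      rw [PySem.Set.mem_ofList]
      have hcs : c ∈ s := by
        rw [hs]
        rcases (by simpa using hc : c = c0 ∨ c = c1 ∨ c = c2) with rfl | rfl | rfl <;> simp
      exact hperm.mem_iff.mp hcs
  -- m is the lexicographic minimum of the enumeration
  have hmin : ∀ x ∈ fnl, m ≤ x := by
    intro x hx
    obtain ⟨u, hxu, hulen, hucount, humem⟩ :=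
      combRec_sound 4 (PySem.Set.ofList ary) g [] hnodup x (by rw [← hfnl]; exact hx)
    have husub : u.Subperm s := by
      refine List.subperm_ext_iff.mpr (fun a _ => ?_)
      rw [hperm.count_eq a]
      exact hucount a
    have htk := take_sorted_le u s hpair husub
    have hu3 : u.length = 3 := by simpa using hulen
    rw [hu3, hs] at htk
    rw [hxu, hm, String.le_iff_toList_le]
    simpa using htk
  -- hence sorted(fnl)[0] = m
  obtain ⟨m0, t, hsorted⟩ : ∃ m0 t, PySem.List.sorted fnl (fun x => x) false = m0 :: t := by
    rcases hsf : PySem.List.sorted fnl (fun x => x) false with _ | ⟨m0, t⟩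
    · rw [PySem.List.sorted_eq_nil_iff] at hsf
      rw [hsf] at hmmem; simp at hmmem
    · exact ⟨m0, t, rfl⟩
  have hm0 : m0 = m := by
    have h1 : m0 ≤ m := PySem.List.key_head_sorted_le fnl (fun x => x) hsorted m hmmem
    have h2 : m ≤ m0 := hmin m0 (by
      have : m0 ∈ PySem.List.sorted fnl (fun x => x) false := by rw [hsorted]; simp
      rwa [PySem.List.mem_sorted] at this)
    exact le_antisymm h1 h2
  -- evaluate both ports
  show SmallestThreeDigitNumberFromBigNumber num = SmallestThreeDigitNumberFromBigNumber_alt num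
  simp only [SmallestThreeDigitNumberFromBigNumber, SmallestThreeDigitNumberFromBigNumber_alt]
  rw [← hary, hlst, hcnt,
      show (List.map (fun k => ((List.count k ary : Nat) : Int)) (PySem.Set.ofList ary)) =
        (List.map (fun k => ((g k : Nat) : Int)) (PySem.Set.ofList ary)) from rfl,
      ← hfnl, ← hsdef, hsorted, hs]
  simp [PySem.List.pyGet?, PySem.List.pyIdx?, hm0, hm]
  rw [if_pos (show (0:Int) ≤ (rest.length:Int) + 1 + 1 by omega),
      if_pos (show (0:Int) ≤ (rest.length:Int) + 1 by omega),
      if_pos (show (2:Int) ≤ (rest.length:Int) + 1 + 1 by omega)]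
  simp
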